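-- pv_equiv track=rewrite | github.com/THUDM/slime | examples/search-r1/generate_with_search.py | _passages2string_local
-- ===== SOURCE A (Python) =====
-- def _passages2string_local(results, queries):
--     """Format local retriever results (adapted from search-r1-oai)"""
--     formatted_results = ""
--     for query_idx, query_results in enumerate(results):
--         if len(queries) > 1:
--             formatted_results += f"Results for query {query_idx + 1}: {queries[query_idx]}\n"
--         for idx, doc in enumerate(query_results):
--             title = doc.get("title", "No title")
--             text = doc.get("text", "")
--             if not text:
--                 # Fallback to contents field if text is empty
--                 contents = doc.get("contents", "")
--                 if contents:
--                     lines = contents.split("\n")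
--                     title = lines[0].strip('"') if lines else "No title"
--                     text = "\n".join(lines[1:]) if len(lines) > 1 else ""
--             formatted_results += f"Doc {idx+1}(Title: {title}) {text}\n"
--         if query_idx < len(results) - 1:
--             formatted_results += "\n"
--     return formatted_results
-- ===== SOURCE B (Python) =====
-- def _doc_line(idx, doc):
--     title = doc.get("title", "No title")
--     text = doc.get("text", "")
--     if not text:
--         # Fallback to contents field if text is empty
--         contents = doc.get("contents", "")
--         if contents:
--             lines = contents.split("\n")
--             title = lines[0].strip('"') if lines else "No title"
--             text = "\n".join(lines[1:]) if len(lines) > 1 else ""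
--     return f"Doc {idx + 1}(Title: {title}) {text}\n"
--
--
-- def _passages2string_local(results, queries):
--     """Format local retriever results: structural recursion over the query blocks."""
--
--     def block(qi, docs):
--         head = f"Results for query {qi + 1}: {queries[qi]}\n" if len(queries) > 1 else ""
--         return head + "".join(_doc_line(j, d) for j, d in enumerate(docs))
--
--     def rec(qi, rest):
--         if not rest:
--             return ""
--         if len(rest) == 1:
--             return block(qi, rest[0])
--         return block(qi, rest[0]) + "\n" + rec(qi + 1, rest[1:])
--
--     return rec(0, results)
-- ===== Notes on version B (the rewrite author's own statement) =====
-- stated objective: alternative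
-- what changed: Replaces the single mutable-string accumulator loop with index-based separator logic by a structural recursion over the query list: each block (optional header + join of doc lines) is built independently and blocks are glued with '\n' by the recursion's is-last pattern, eliminating the 'query_idx < len(results)-1' check.
import Mathlib
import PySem

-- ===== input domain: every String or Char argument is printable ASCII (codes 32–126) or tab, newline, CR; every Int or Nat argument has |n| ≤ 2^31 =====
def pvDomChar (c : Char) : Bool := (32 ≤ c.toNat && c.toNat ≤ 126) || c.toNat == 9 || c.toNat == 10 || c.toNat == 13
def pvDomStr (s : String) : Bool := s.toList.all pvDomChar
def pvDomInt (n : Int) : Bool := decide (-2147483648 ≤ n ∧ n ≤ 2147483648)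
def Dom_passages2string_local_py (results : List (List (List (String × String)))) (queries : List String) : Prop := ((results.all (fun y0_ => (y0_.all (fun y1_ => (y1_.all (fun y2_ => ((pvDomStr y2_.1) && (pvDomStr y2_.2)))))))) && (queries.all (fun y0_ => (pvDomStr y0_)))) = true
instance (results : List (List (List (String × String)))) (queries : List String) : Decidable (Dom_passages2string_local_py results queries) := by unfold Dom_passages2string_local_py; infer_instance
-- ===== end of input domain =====

-- B rewrites A's single accumulator loop (with its index-based separator test) as a
-- structural recursion over query blocks glued by "\n"; same output, same cost.

-- ===== PORT A =====
-- doc.get(k, dflt) on a dict given as an association list: first match, else default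
def pvGetA (doc : List (String × String)) (k dflt : String) : String :=
  ((doc.lookup k).getD dflt)

def passages2string_local_py (results : List (List (List (String × String)))) (queries : List String) : String :=
  (PySem.List.enumerate results 0).foldl
    (fun acc p =>
      let query_idx := p.1
      let query_results := p.2
      let acc := if queries.length > 1 then
          acc ++ "Results for query " ++ PySem.Int.toStr (query_idx + 1) ++ ": "
            ++ PySem.List.pyGetD queries query_idx "" ++ "\n"
        else acc
      let acc := (PySem.List.enumerate query_results 0).foldl
        (fun acc2 q =>
          let idx := q.1
          let doc := q.2
          let title := pvGetA doc "title" "No title"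
          let text := pvGetA doc "text" ""
          let tt : String × String :=
            if text = "" then
              let contents := pvGetA doc "contents" ""
              if contents ≠ "" then
                let lines := (PySem.Str.split? contents "\n").getD []
                (if lines ≠ [] then PySem.Str.stripChars (PySem.List.pyGetD lines 0 "") "\"" else "No title",
                 if lines.length > 1 then PySem.Str.join "\n" (lines.drop 1) else "")
              else (title, text)
            else (title, text)
          acc2 ++ "Doc " ++ PySem.Int.toStr (idx + 1) ++ "(Title: " ++ tt.1 ++ ") " ++ tt.2 ++ "\n")
        acc
      if query_idx < (results.length : Int) - 1 then acc ++ "\n" else acc)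
    ""

-- ===== PORT B =====
-- doc.get(k, dflt): first match, else default (B-side helper)
def pvGetB (doc : List (String × String)) (k dflt : String) : String :=
  ((doc.lookup k).getD dflt)

def pvDocLineB (idx : Int) (doc : List (String × String)) : String :=
  let title := pvGetB doc "title" "No title"
  let text := pvGetB doc "text" ""
  let tt : String × String :=
    if text = "" then
      let contents := pvGetB doc "contents" ""
      if contents ≠ "" then
        let lines := (PySem.Str.split? contents "\n").getD []
        (if lines ≠ [] then PySem.Str.stripChars (PySem.List.pyGetD lines 0 "") "\"" else "No title",
         if lines.length > 1 then PySem.Str.join "\n" (lines.drop 1) else "")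
      else (title, text)
    else (title, text)
  "Doc " ++ PySem.Int.toStr (idx + 1) ++ "(Title: " ++ tt.1 ++ ") " ++ tt.2 ++ "\n"

def pvBlockB (queries : List String) (qi : Int) (docs : List (List (String × String))) : String :=
  let head := if queries.length > 1 then
      "Results for query " ++ PySem.Int.toStr (qi + 1) ++ ": " ++ PySem.List.pyGetD queries qi "" ++ "\n"
    else ""
  head ++ PySem.Str.join "" ((PySem.List.enumerate docs 0).map (fun q => pvDocLineB q.1 q.2))

def pvRecB (queries : List String) (qi : Int) : List (List (List (String × String))) → String
  | [] => ""
  | [d] => pvBlockB queries qi d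
  | d :: rest => pvBlockB queries qi d ++ "\n" ++ pvRecB queries (qi + 1) rest

def passages2string_local_py_alt (results : List (List (List (String × String)))) (queries : List String) : String :=
  pvRecB queries 0 results

-- ===== PRECONDITION & SPEC =====
-- Pre_ excludes exactly the inputs where Python A raises IndexError (header lookup
-- queries[query_idx] with more results than queries when len(queries) > 1); B raises there too.
def Pre_passages2string_local_py (results : List (List (List (String × String)))) (queries : List String) : Prop :=
  queries.length ≤ 1 ∨ results.length ≤ queries.length
instance (results : List (List (List (String × String)))) (queries : List String) : Decidable (Pre_passages2string_local_py results queries) := by unfold Pre_passages2string_local_py; infer_instance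

def pvWitness_passages2string_local_py : (List (List (List (String × String)))) × List String :=
  ([[[("title", "T"), ("text", "x")]], [[("contents", "\"H\"\nbody")]]], ["q1", "q2"])

def Spec_passages2string_local_py (results : List (List (List (String × String)))) (queries : List String) (out : String) : Prop := out = passages2string_local_py_alt results queries
instance (results : List (List (List (String × String)))) (queries : List String) (out : String) : Decidable (Spec_passages2string_local_py results queries out) := by unfold Spec_passages2string_local_py; infer_instance

-- ===== CLAIM (what is proved, stated in full; the proofs are below) =====
def Claim_equal_passages2string_local_py : Prop := ∀ (results : List (List (List (String × String)))) (queries : List String), Dom_passages2string_local_py results queries → Pre_passages2string_local_py results queries → Spec_passages2string_local_py results queries (passages2string_local_py results queries)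

-- ===== LEMMAS AND PROOFS =====

theorem pv_str_ext (a b : String) (h : a.toList = b.toList) : a = b :=
  String.toList_inj.mp h

theorem pv_join_cons (s : String) (l : List String) :
    PySem.Str.join "" (s :: l) = s ++ PySem.Str.join "" l := by
  apply pv_str_ext
  simp only [PySem.Str.join, PySem.Chars.join, List.intercalate, String.toList_append,
    String.toList_ofList, List.map_cons]
  cases l <;> simp

-- folding "append a line" equals appending the join of the mapped lines
theorem pv_foldl_append_join {α : Type} (f : α → String) :
    ∀ (l : List α) (acc : String),
      l.foldl (fun a x => a ++ f x) acc = acc ++ PySem.Str.join "" (l.map f) := by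
  intro l
  induction l with
  | nil =>
      intro acc
      apply pv_str_ext
      simp [PySem.Str.join, PySem.Chars.join, List.intercalate]
  | cons x xs ih =>
      intro acc
      rw [List.map_cons, pv_join_cons, List.foldl_cons, ih]
      apply pv_str_ext
      simp

-- the A-side inner doc loop appends exactly B's joined doc lines
theorem pv_inner_loop (docs : List (List (String × String))) (acc : String) :
    (PySem.List.enumerate docs 0).foldl
        (fun acc2 q =>
          let idx := q.1
          let doc := q.2
          let title := pvGetA doc "title" "No title"
          let text := pvGetA doc "text" ""
          let tt : String × String :=
            if text = "" then
              let contents := pvGetA doc "contents" ""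
              if contents ≠ "" then
                let lines := (PySem.Str.split? contents "\n").getD []
                (if lines ≠ [] then PySem.Str.stripChars (PySem.List.pyGetD lines 0 "") "\"" else "No title",
                 if lines.length > 1 then PySem.Str.join "\n" (lines.drop 1) else "")
              else (title, text)
            else (title, text)
          acc2 ++ "Doc " ++ PySem.Int.toStr (idx + 1) ++ "(Title: " ++ tt.1 ++ ") " ++ tt.2 ++ "\n")
        acc
      = acc ++ PySem.Str.join "" ((PySem.List.enumerate docs 0).map (fun q => pvDocLineB q.1 q.2)) := by
  rw [← pv_foldl_append_join (fun q : Int × List (String × String) => pvDocLineB q.1 q.2)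
      (PySem.List.enumerate docs 0) acc]
  apply List.foldl_ext
  intro a q _
  simp only [pvDocLineB, pvGetB, pvGetA]
  apply pv_str_ext
  simp

-- the A-side step on one query produces B's block (header + docs)
theorem pv_step_block (queries : List String) (qi : Int)
    (docs : List (List (String × String))) (acc : String) :
    ((if queries.length > 1 then
        acc ++ "Results for query " ++ PySem.Int.toStr (qi + 1) ++ ": "
          ++ PySem.List.pyGetD queries qi "" ++ "\n"
      else acc)
     ++ PySem.Str.join "" ((PySem.List.enumerate docs 0).map (fun q => pvDocLineB q.1 q.2)))
    = acc ++ pvBlockB queries qi docs := by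
  unfold pvBlockB
  by_cases h : queries.length > 1
  · rw [if_pos h, if_pos h]
    apply pv_str_ext
    simp
  · rw [if_neg h, if_neg h]
    apply pv_str_ext
    simp

-- main loop lemma: A's fold over the remaining queries equals acc ++ B's recursion,
-- provided qi + (number remaining) equals the total number of queries N
theorem pv_main (queries : List String) (N : Int) :
    ∀ (rest : List (List (List (String × String)))) (qi : Int) (acc : String),
      qi + rest.length = N →
      (PySem.List.enumerate rest qi).foldl
        (fun acc p =>
          let query_idx := p.1
          let query_results := p.2
          let acc := if queries.length > 1 then
              acc ++ "Results for query " ++ PySem.Int.toStr (query_idx + 1) ++ ": "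
                ++ PySem.List.pyGetD queries query_idx "" ++ "\n"
            else acc
          let acc := (PySem.List.enumerate query_results 0).foldl
            (fun acc2 q =>
              let idx := q.1
              let doc := q.2
              let title := pvGetA doc "title" "No title"
              let text := pvGetA doc "text" ""
              let tt : String × String :=
                if text = "" then
                  let contents := pvGetA doc "contents" ""
                  if contents ≠ "" then
                    let lines := (PySem.Str.split? contents "\n").getD []
                    (if lines ≠ [] then PySem.Str.stripChars (PySem.List.pyGetD lines 0 "") "\"" else "No title",
                     if lines.length > 1 then PySem.Str.join "\n" (lines.drop 1) else "")
                  else (title, text)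
                else (title, text)
              acc2 ++ "Doc " ++ PySem.Int.toStr (idx + 1) ++ "(Title: " ++ tt.1 ++ ") " ++ tt.2 ++ "\n")
            acc
          if query_idx < N - 1 then acc ++ "\n" else acc)
        acc
      = acc ++ pvRecB queries qi rest := by
  intro rest
  induction rest with
  | nil =>
      intro qi acc _
      rw [PySem.List.enumerate_nil, List.foldl_nil]
      show acc = acc ++ pvRecB queries qi []
      apply pv_str_ext
      simp [pvRecB]
  | cons d ds ih =>
      intro qi acc hN
      rw [PySem.List.enumerate_cons, List.foldl_cons]
      simp only
      rw [pv_inner_loop, pv_step_block]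
      cases ds with
      | nil =>
          have hqi : ¬ (qi < N - 1) := by
            simp at hN; omega
          rw [if_neg hqi]
          simp [pvRecB]
      | cons e es =>
          have hqi : qi < N - 1 := by
            simp at hN; omega
          rw [if_pos hqi]
          rw [ih (qi + 1) _ (by simp at hN ⊢; omega)]
          show acc ++ pvBlockB queries qi d ++ "\n" ++ pvRecB queries (qi + 1) (e :: es)
              = acc ++ pvRecB queries qi (d :: e :: es)
          apply pv_str_ext
          simp [pvRecB]

-- ===== VERDICT (by name: the statement is the Claim_ definition above) =====
theorem passages2string_local_py_spec : Claim_equal_passages2string_local_py := by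
  unfold Claim_equal_passages2string_local_py
  intro results queries _ _
  unfold Spec_passages2string_local_py passages2string_local_py passages2string_local_py_alt
  rw [pv_main queries (results.length : Int) results 0 "" (by simp)]
  apply pv_str_ext
  simp
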